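-- pv_equiv track=rewrite | github.com/dubsidiya/checkbrain | desh/ege2026kp/23solve/23-250.py | f
-- ===== SOURCE A (Python) =====
-- def f( start, prog, A, C ):
--   if not prog: return start
--   c, prog = prog[0], prog[1:]
--   if c == '1':
--     return f( start+3, prog, A, C )
--   if c == '2':
--     return f( start*A, prog, A, C )
--   if c == '3':
--     return f( start+C, prog, A, C )
-- ===== SOURCE B (Python) =====
-- def f(start, prog, A, C):
--     result = start
--     for c in prog:
--         if c == '1':
--             result += 3
--         elif c == '2':
--             result *= A
--         elif c == '3':
--             result += C
--         else:
--             return None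
--     return result
-- ===== Notes on version B (the rewrite author's own statement) =====
-- stated objective: simpler
-- what changed: Replaced the recursive char-by-char self-call (which rebuilds the remaining program string at every step) with a single iterative loop over the characters carrying a running accumulator.
import Mathlib
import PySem

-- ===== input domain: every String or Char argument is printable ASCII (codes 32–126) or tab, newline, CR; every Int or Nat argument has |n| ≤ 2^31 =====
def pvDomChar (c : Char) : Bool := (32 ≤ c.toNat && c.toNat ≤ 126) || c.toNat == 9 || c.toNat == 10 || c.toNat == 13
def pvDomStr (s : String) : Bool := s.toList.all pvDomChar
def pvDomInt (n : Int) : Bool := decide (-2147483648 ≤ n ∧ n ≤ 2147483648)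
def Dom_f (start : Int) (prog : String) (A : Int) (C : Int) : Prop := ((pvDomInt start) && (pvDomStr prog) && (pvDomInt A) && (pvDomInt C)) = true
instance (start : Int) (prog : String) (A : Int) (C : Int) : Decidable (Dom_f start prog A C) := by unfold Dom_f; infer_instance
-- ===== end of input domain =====

-- B replaces A's recursive self-call per character with a single iterative fold carrying an accumulator (simpler).


-- ===== PORT A =====
-- A recurses on the program string: head char chooses the operation, tail is the rest;
-- falling through all branches (unknown char) returns None.
def fGo (A C : Int) : Int → List Char → Option Int
  | start, [] => some start
  | start, c :: rest =>
    if c = '1' then fGo A C (start + 3) rest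
    else if c = '2' then fGo A C (start * A) rest
    else if c = '3' then fGo A C (start + C) rest
    else none

def f (start : Int) (prog : String) (A : Int) (C : Int) : Option Int :=
  fGo A C start prog.toList

-- ===== PORT B =====
-- B iterates once over the characters with a running result; an unknown char yields None
-- (the early return is modeled by the Option-absorbing step of the fold).
def fAltStep (A C : Int) (acc : Option Int) (c : Char) : Option Int :=
  match acc with
  | none => none
  | some r =>
    if c = '1' then some (r + 3)
    else if c = '2' then some (r * A)
    else if c = '3' then some (r + C)
    else none

def f_alt (start : Int) (prog : String) (A : Int) (C : Int) : Option Int :=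
  prog.toList.foldl (fAltStep A C) (some start)

-- ===== PRECONDITION & SPEC =====
def Spec_f (start : Int) (prog : String) (A : Int) (C : Int) (out : Option Int) : Prop := out = f_alt start prog A C
instance (start : Int) (prog : String) (A : Int) (C : Int) (out : Option Int) : Decidable (Spec_f start prog A C out) := by unfold Spec_f; infer_instance

-- ===== CLAIM (what is proved, stated in full; the proofs are below) =====
def Claim_equal_f : Prop := ∀ (start : Int) (prog : String) (A : Int) (C : Int), Dom_f start prog A C → Spec_f start prog A C (f start prog A C)

-- ===== LEMMAS AND PROOFS =====
theorem foldl_step_none (A C : Int) (cs : List Char) :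
    cs.foldl (fAltStep A C) none = none := by
  induction cs with
  | nil => rfl
  | cons c cs ih => simpa [fAltStep] using ih

theorem fGo_eq_foldl (A C : Int) (cs : List Char) (start : Int) :
    fGo A C start cs = cs.foldl (fAltStep A C) (some start) := by
  induction cs generalizing start with
  | nil => rfl
  | cons c cs ih =>
    simp only [fGo, List.foldl_cons, fAltStep]
    split_ifs <;> first | exact ih _ | exact (foldl_step_none A C cs).symm

-- ===== VERDICT (by name: the statement is the Claim_ definition above) =====
theorem f_spec : Claim_equal_f := by
  intro start prog A C _
  unfold Spec_f f f_alt
  exact fGo_eq_foldl A C prog.toList start
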